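-- pv_equiv track=rewrite | github.com/WAEmberlin/policy-watch | src/processing/weekly_overview.py | group_bills_by_theme
-- ===== SOURCE A (Python) =====
-- from typing import Dict, List, Optional
--
-- def group_bills_by_theme(bills: List[Dict]) -> Dict[str, List[Dict]]:
--     """Group bills by common themes/topics."""
--     themes = {
--         "immigration": [],
--         "healthcare": [],
--         "education": [],
--         "economy": [],
--         "defense": [],
--         "environment": [],
--         "technology": [],
--         "tax": [],
--         "infrastructure": [],
--         "other": []
--     }
--
--     theme_keywords = {
--         "immigration": ["immigration", "immigrant", "visa", "citizenship", "border", "h-1b", "h1b"],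
--         "healthcare": ["health", "medicare", "medicaid", "healthcare", "medical", "hospital", "pharmaceutical"],
--         "education": ["education", "school", "student", "university", "college", "teacher"],
--         "economy": ["economy", "economic", "business", "trade", "commerce", "financial", "bank"],
--         "defense": ["defense", "military", "veteran", "armed forces", "national security"],
--         "environment": ["environment", "climate", "energy", "renewable", "emission", "pollution"],
--         "technology": ["technology", "tech", "cyber", "digital", "internet", "data", "privacy"],
--         "tax": ["tax", "taxation", "irs", "revenue"],
--         "infrastructure": ["infrastructure", "transportation", "highway", "bridge", "road", "rail"]
--     }
--
--     for bill in bills: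
--         title_lower = bill.get("title", "").lower()
--         summary_lower = bill.get("summary", "").lower()
--         text = f"{title_lower} {summary_lower}"
--
--         categorized = False
--         for theme, keywords in theme_keywords.items():
--             if any(keyword in text for keyword in keywords):
--                 themes[theme].append(bill)
--                 categorized = True
--                 break
--
--         if not categorized:
--             themes["other"].append(bill)
--
--     # Remove empty themes
--     return {k: v for k, v in themes.items() if v}
-- ===== SOURCE B (Python) =====
-- from typing import Dict, List
--
-- THEME_KEYWORDS = {
--     "immigration": ["immigration", "immigrant", "visa", "citizenship", "border", "h-1b", "h1b"],
--     "healthcare": ["health", "medicare", "medicaid", "healthcare", "medical", "hospital", "pharmaceutical"],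
--     "education": ["education", "school", "student", "university", "college", "teacher"],
--     "economy": ["economy", "economic", "business", "trade", "commerce", "financial", "bank"],
--     "defense": ["defense", "military", "veteran", "armed forces", "national security"],
--     "environment": ["environment", "climate", "energy", "renewable", "emission", "pollution"],
--     "technology": ["technology", "tech", "cyber", "digital", "internet", "data", "privacy"],
--     "tax": ["tax", "taxation", "irs", "revenue"],
--     "infrastructure": ["infrastructure", "transportation", "highway", "bridge", "road", "rail"],
-- }
--
--
-- def group_bills_by_theme(bills: List[Dict]) -> Dict[str, List[Dict]]:
--     """Theme-major grouping with a shrinking pool: precompute each bill's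
--     search text once, then for each theme in order peel off the still
--     unassigned bills that match one of its keywords; whatever survives every
--     theme ends up in "other"."""
--     remaining = [
--         (f'{b.get("title", "").lower()} {b.get("summary", "").lower()}', b)
--         for b in bills
--     ]
--     result = {}
--     for theme, kws in THEME_KEYWORDS.items():
--         matched = [tb for tb in remaining if any(k in tb[0] for k in kws)]
--         if matched:
--             result[theme] = [b for _, b in matched]
--             remaining = [tb for tb in remaining if not any(k in tb[0] for k in kws)]
--     if remaining:
--         result["other"] = [b for _, b in remaining]
--     return result
-- ===== Notes on version B (the rewrite author's own statement) =====
-- stated objective: alternative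
-- what changed: A loops bill-major, classifying each bill to the first matching theme and appending into pre-built buckets; B loops theme-major over a shrinking pool: it precomputes each bill's search text once, then for each theme in order peels off the still-unassigned matching bills, leftovers becoming 'other'.
import Mathlib
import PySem

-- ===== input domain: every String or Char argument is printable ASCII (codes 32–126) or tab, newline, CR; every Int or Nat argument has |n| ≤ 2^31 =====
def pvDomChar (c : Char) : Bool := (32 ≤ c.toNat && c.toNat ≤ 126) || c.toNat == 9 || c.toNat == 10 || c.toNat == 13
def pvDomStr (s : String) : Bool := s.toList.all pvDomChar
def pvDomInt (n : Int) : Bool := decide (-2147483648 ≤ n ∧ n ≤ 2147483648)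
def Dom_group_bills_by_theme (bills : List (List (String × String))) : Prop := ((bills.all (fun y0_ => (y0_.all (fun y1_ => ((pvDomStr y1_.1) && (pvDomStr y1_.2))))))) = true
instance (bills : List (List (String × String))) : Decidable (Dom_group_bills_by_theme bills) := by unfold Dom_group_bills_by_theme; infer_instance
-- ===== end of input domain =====

-- B replaces A's bill-major classify-and-append loop by a theme-major pass over a shrinking
-- pool of still-unassigned bills (alternative decomposition, same asymptotic cost).


-- ===== PORT A =====
-- theme_keywords (same module constant in both Pythons)
def pvThemeKW : List (String × List String) :=
  [("immigration", ["immigration", "immigrant", "visa", "citizenship", "border", "h-1b", "h1b"]),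
   ("healthcare", ["health", "medicare", "medicaid", "healthcare", "medical", "hospital", "pharmaceutical"]),
   ("education", ["education", "school", "student", "university", "college", "teacher"]),
   ("economy", ["economy", "economic", "business", "trade", "commerce", "financial", "bank"]),
   ("defense", ["defense", "military", "veteran", "armed forces", "national security"]),
   ("environment", ["environment", "climate", "energy", "renewable", "emission", "pollution"]),
   ("technology", ["technology", "tech", "cyber", "digital", "internet", "data", "privacy"]),
   ("tax", ["tax", "taxation", "irs", "revenue"]),
   ("infrastructure", ["infrastructure", "transportation", "highway", "bridge", "road", "rail"])]

-- text = f"{bill.get('title','').lower()} {bill.get('summary','').lower()}" (same expression in both Pythons)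
def pvBillText (bill : List (String × String)) : String :=
  let title_lower := PySem.Str.lower ((PySem.Dict.mk bill).getD "title" "")
  let summary_lower := PySem.Str.lower ((PySem.Dict.mk bill).getD "summary" "")
  title_lower ++ " " ++ summary_lower

-- A's initial themes dict literal with all ten keys
def pvThemes0 : PySem.Dict String (List (List (String × String))) :=
  PySem.Dict.mk [("immigration", []), ("healthcare", []), ("education", []), ("economy", []),
    ("defense", []), ("environment", []), ("technology", []), ("tax", []), ("infrastructure", []),
    ("other", [])]

def group_bills_by_theme (bills : List (List (String × String))) : List (String × List (List (String × String))) :=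
  -- for bill in bills: inner for-loop over theme_keywords with break, via a (themes, categorized) state
  -- (themes[theme].append(bill) is modify at the key, which is always present in themes)
  let themes := bills.foldl (fun themes bill =>
    let text := pvBillText bill
    let r := pvThemeKW.foldl (fun st p =>
        if st.2 then st  -- break reached earlier
        else if p.2.any (fun kw => PySem.Str.isIn kw text) then
          (st.1.modify p.1 [] (fun v => v ++ [bill]), true)
        else st) (themes, false)
    if r.2 then r.1 else r.1.modify "other" [] (fun v => v ++ [bill])) pvThemes0
  -- {k: v for k, v in themes.items() if v}: themes has unique keys, so the comprehension is the filtered items list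
  themes.items.filter (fun kv => !kv.2.isEmpty)

-- ===== PORT B =====
def group_bills_by_theme_alt (bills : List (List (String × String))) : List (String × List (List (String × String))) :=
  -- remaining = [(text, bill) for bill in bills] (text precomputed once)
  let remaining0 := bills.map (fun b => (pvBillText b, b))
  -- for theme, kws in THEME_KEYWORDS.items(): peel matched bills off the remaining pool
  -- (result is built by inserting only fresh keys in theme order = appending to the assoc list)
  let r := pvThemeKW.foldl (fun (st : List (String × List (List (String × String))) × List (String × List (String × String))) p =>
      let matched := st.2.filter (fun tb => p.2.any (fun k => PySem.Str.isIn k tb.1))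
      if matched.isEmpty then st
      else (st.1 ++ [(p.1, matched.map (·.2))],
            st.2.filter (fun tb => !p.2.any (fun k => PySem.Str.isIn k tb.1))))
    ([], remaining0)
  -- if remaining: result["other"] = leftovers
  if r.2.isEmpty then r.1 else r.1 ++ [("other", r.2.map (·.2))]

-- ===== PRECONDITION & SPEC =====
def Spec_group_bills_by_theme (bills : List (List (String × String))) (out : List (String × List (List (String × String)))) : Prop := out = group_bills_by_theme_alt bills
instance (bills : List (List (String × String))) (out : List (String × List (List (String × String)))) : Decidable (Spec_group_bills_by_theme bills out) := by unfold Spec_group_bills_by_theme; infer_instance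

-- ===== CLAIM (what is proved, stated in full; the proofs are below) =====
def Claim_equal_group_bills_by_theme : Prop := ∀ (bills : List (List (String × String))), Dom_group_bills_by_theme bills → Spec_group_bills_by_theme bills (group_bills_by_theme bills)

-- ===== LEMMAS AND PROOFS =====

-- "does text match one of the keywords" (the any(...) both programs use)
def pvMatch (kws : List String) (t : String) : Bool := kws.any (fun k => PySem.Str.isIn k t)

-- first matching theme key of a keyword table, if any
def pvFM (l : List (String × List String)) (t : String) : Option String :=
  (l.find? (fun p => pvMatch p.2 t)).map (·.1)

-- classification a bill gets (A's first-break theme / B's surviving theme)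
def pvClassify (bill : List (String × String)) : String :=
  match pvThemeKW.find? (fun p => p.2.any (fun kw => PySem.Str.isIn kw (pvBillText bill))) with
  | some p => p.1
  | none => "other"

-- the ten theme keys in A's dict-literal order
def pvKeys : List String := pvThemeKW.map (·.1) ++ ["other"]

-- the group of a theme: the bills classified to it, in input order
def pvG (bills : List (List (String × String))) (k : String) : List (List (String × String)) :=
  ((bills.map (fun bill => (pvClassify bill, bill))).filter (fun p => p.1 == k)).map (·.2)

theorem pvClassify_getD (bill : List (String × String)) :
    pvClassify bill = (pvFM pvThemeKW (pvBillText bill)).getD "other" := by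
  unfold pvClassify pvFM pvMatch
  cases h : pvThemeKW.find? (fun p => p.2.any (fun kw => PySem.Str.isIn kw (pvBillText bill))) <;>
    simp only [h, Option.map_some, Option.map_none, Option.getD_some, Option.getD_none]

theorem pvFM_cons (q : String × List String) (l : List (String × List String)) (t : String) :
    pvFM (q :: l) t = if pvMatch q.2 t then some q.1 else pvFM l t := by
  unfold pvFM
  rw [List.find?_cons]
  split <;> simp_all

theorem pvFM_mem {l : List (String × List String)} {t : String} {k : String}
    (h : pvFM l t = some k) : k ∈ l.map Prod.fst := by
  unfold pvFM at h
  rcases Option.map_eq_some_iff.mp h with ⟨p, hp, rfl⟩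
  exact List.mem_map.mpr ⟨p, List.mem_of_find?_eq_some hp, rfl⟩

-- A's inner fold never changes the state once the flag is set (the break)
theorem pv_inner_flag (l : List (String × List String)) (pr : String × List String → Bool)
    (f : PySem.Dict String (List (List (String × String))) → String → PySem.Dict String (List (List (String × String))))
    (d : PySem.Dict String (List (List (String × String)))) :
    l.foldl (fun st p => if st.2 then st else if pr p then (f st.1 p.1, true) else st) (d, true) = (d, true) := by
  induction l with
  | nil => rfl
  | cons p l ih => simpa using ih

-- A's per-bill step is a single update at the first matching theme (or "other")
theorem pv_inner_eq (l : List (String × List String)) (pr : String × List String → Bool)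
    (f : PySem.Dict String (List (List (String × String))) → String → PySem.Dict String (List (List (String × String))))
    (d : PySem.Dict String (List (List (String × String)))) :
    (let r := l.foldl (fun st p => if st.2 then st else if pr p then (f st.1 p.1, true) else st) (d, false);
     if r.2 then r.1 else f r.1 "other")
    = f d (match l.find? pr with | some p => p.1 | none => "other") := by
  induction l generalizing d with
  | nil => rfl
  | cons p l ih =>
    by_cases h : pr p
    · simp [List.foldl_cons, h, pv_inner_flag, List.find?_cons_of_pos h]
    · simpa [List.foldl_cons, h, List.find?_cons_of_neg h] using ih d

theorem pv_cls_mem (bill : List (String × String)) : pvClassify bill ∈ pvKeys := by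
  unfold pvClassify pvKeys
  cases h : pvThemeKW.find? (fun p => p.2.any (fun kw => PySem.Str.isIn kw (pvBillText bill))) with
  | none => simp only [h]; simp
  | some p =>
    have hp := List.mem_of_find?_eq_some h
    simp only [h, List.mem_append, List.mem_map]
    exact Or.inl ⟨p, hp, rfl⟩

theorem pv_getD0 (k : String) : pvThemes0.getD k [] = [] := by
  rw [PySem.Dict.getD_eq_get?_getD]
  unfold pvThemes0
  simp only [PySem.Dict.get?_mk_cons]
  repeat' split
  all_goals rfl

-- A's loop over the bills, rewritten as a grouping fold over B's labelled list
theorem pv_themes_eq (bills : List (List (String × String))) :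
    bills.foldl (fun themes bill =>
      let text := pvBillText bill
      let r := pvThemeKW.foldl (fun st p =>
          if st.2 then st
          else if p.2.any (fun kw => PySem.Str.isIn kw text) then
            (st.1.modify p.1 [] (fun v => v ++ [bill]), true)
          else st) (themes, false)
      if r.2 then r.1 else r.1.modify "other" [] (fun v => v ++ [bill])) pvThemes0
    = (bills.map (fun bill => (pvClassify bill, bill))).foldl
        (fun d p => d.modify p.1 [] (fun v => v ++ [p.2])) pvThemes0 := by
  rw [List.foldl_map]
  apply PySem.List.foldl_congr_mem
  intro themes bill _
  simpa [pvClassify] using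
    pv_inner_eq pvThemeKW (fun p => p.2.any (fun kw => PySem.Str.isIn kw (pvBillText bill)))
      (fun d k => d.modify k [] (fun v => v ++ [bill])) themes

theorem pv_keys_final (bills : List (List (String × String))) :
    ((bills.map (fun bill => (pvClassify bill, bill))).foldl
        (fun d p => d.modify p.1 [] (fun v => v ++ [p.2])) pvThemes0).keys = pvKeys := by
  rw [List.foldl_map]
  show (List.foldl (fun d bill => d.modify (pvClassify bill) [] (fun v => v ++ [bill])) pvThemes0 bills).keys = pvKeys
  rw [PySem.Dict.keys_foldl_modify_key bills (fun bill => pvClassify bill) []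
        (fun _ bill => fun v => v ++ [bill]) pvThemes0]
  rw [PySem.Set.update_eq_append_filter]
  have h0 : pvThemes0.keys = pvKeys := by decide
  have hnil : List.filter (fun y => !PySem.Set.contains pvThemes0.keys y)
      (PySem.Set.ofList (bills.map (fun bill => pvClassify bill))) = [] := by
    rw [List.filter_eq_nil_iff]
    intro y hy
    have hy' : y ∈ bills.map (fun bill => pvClassify bill) :=
      (PySem.Set.mem_ofList _ y).mp hy
    rcases List.mem_map.mp hy' with ⟨bill, _, rfl⟩
    rw [h0]
    simp
    exact pv_cls_mem bill
  rw [hnil, h0]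
  simp

theorem pv_A_eq (bills : List (List (String × String))) :
    group_bills_by_theme bills
    = (pvKeys.map (fun k => (k, pvG bills k))).filter (fun kv => !kv.2.isEmpty) := by
  show ((bills.foldl (fun themes bill =>
      let text := pvBillText bill
      let r := pvThemeKW.foldl (fun st p =>
          if st.2 then st
          else if p.2.any (fun kw => PySem.Str.isIn kw text) then
            (st.1.modify p.1 [] (fun v => v ++ [bill]), true)
          else st) (themes, false)
      if r.2 then r.1 else r.1.modify "other" [] (fun v => v ++ [bill])) pvThemes0).items).filter
      (fun kv => !kv.2.isEmpty) = _
  rw [pv_themes_eq]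
  have hnd : ((bills.map (fun bill => (pvClassify bill, bill))).foldl
      (fun d p => d.modify p.1 [] (fun v => v ++ [p.2])) pvThemes0).keys.Nodup := by
    exact PySem.Dict.nodup_keys_foldl_modify_key _ Prod.fst [] (fun d p => fun v => v ++ [p.2])
      pvThemes0 (by decide)
  rw [PySem.Dict.items_eq_map_keys _ hnd [], pv_keys_final]
  congr 1
  apply List.map_congr_left
  intro k _
  rw [PySem.Dict.getD_foldl_modify_append, pv_getD0]
  rfl

-- B's theme-major fold with a shrinking pool, characterised in one shot
theorem pvB_fold (l : List (String × List String)) (hnd : (l.map Prod.fst).Nodup)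
    (res : List (String × List (List (String × String))))
    (R : List (String × List (String × String))) :
    l.foldl (fun st p =>
      if (st.2.filter (fun tb => p.2.any (fun k => PySem.Str.isIn k tb.1))).isEmpty then st
      else (st.1 ++ [(p.1, (st.2.filter (fun tb => p.2.any (fun k => PySem.Str.isIn k tb.1))).map (·.2))],
            st.2.filter (fun tb => !p.2.any (fun k => PySem.Str.isIn k tb.1)))) (res, R)
    = (res ++ (l.map (fun p => (p.1, (R.filter (fun tb => pvFM l tb.1 == some p.1)).map (·.2)))).filter
          (fun kv => !kv.2.isEmpty),
       R.filter (fun tb => pvFM l tb.1 == none)) := by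
  induction l generalizing res R with
  | nil => simp [pvFM]
  | cons q l ih =>
    have hq : q.1 ∉ l.map Prod.fst := (List.nodup_cons.mp hnd).1
    have hnd' : (l.map Prod.fst).Nodup := (List.nodup_cons.mp hnd).2
    have ha : ∀ t, (pvFM (q :: l) t == some q.1) = pvMatch q.2 t := by
      intro t
      rw [pvFM_cons]
      by_cases h : pvMatch q.2 t
      · simp [h]
      · simp only [h, if_false, Bool.false_eq]
        cases hf : pvFM l t with
        | none => simp
        | some k =>
          have : k ≠ q.1 := fun e => hq (e ▸ pvFM_mem hf)
          simp [this]
    have hb : ∀ p ∈ l, ∀ t, (pvFM (q :: l) t == some p.1)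
        = (!pvMatch q.2 t && (pvFM l t == some p.1)) := by
      intro p hp t
      rw [pvFM_cons]
      by_cases h : pvMatch q.2 t
      · have : q.1 ≠ p.1 := fun e => hq (e ▸ List.mem_map.mpr ⟨p, hp, rfl⟩)
        simp [h, this]
      · simp [h]
    have hc : ∀ t, (pvFM (q :: l) t == none) = (!pvMatch q.2 t && (pvFM l t == none)) := by
      intro t
      rw [pvFM_cons]
      by_cases h : pvMatch q.2 t <;> simp [h]
    have hmatch : R.filter (fun tb => q.2.any (fun k => PySem.Str.isIn k tb.1))
        = R.filter (fun tb => pvFM (q :: l) tb.1 == some q.1) := by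
      apply List.filter_congr
      intro tb _
      rw [ha tb.1]
      rfl
    rw [List.foldl_cons]
    by_cases hm : (R.filter (fun tb => q.2.any (fun k => PySem.Str.isIn k tb.1))).isEmpty
    · -- no bill matches this theme: state unchanged, and the theme's group is empty
      have hall : ∀ tb ∈ R, (pvMatch q.2 tb.1) = false := by
        intro tb htb
        have := List.filter_eq_nil_iff.mp (List.isEmpty_iff.mp hm) tb htb
        simpa [pvMatch] using this
      simp only [hm, if_true]
      rw [ih hnd' res R]
      simp only [Prod.mk.injEq]
      constructor
      · congr 1
        simp only [List.map_cons, List.filter_cons]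
        have hempty : (R.filter (fun tb => pvFM (q :: l) tb.1 == some q.1)) = [] := by
          rw [← hmatch]; exact List.isEmpty_iff.mp hm
        simp only [hempty]
        simp only [List.map_nil, List.isEmpty_nil, Bool.not_true, Bool.false_eq_true, if_false]
        congr 1
        apply List.map_congr_left
        intro p hp
        have hfc : R.filter (fun tb => pvFM (q :: l) tb.1 == some p.1)
            = R.filter (fun tb => pvFM l tb.1 == some p.1) := by
          apply List.filter_congr
          intro tb htb
          rw [hb p hp tb.1, hall tb htb]
          simp
        rw [hfc]
      · apply List.filter_congr
        intro tb htb
        rw [hc tb.1, hall tb htb]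
        simp
    · -- some bills match: they form the theme's group and leave the pool
      have hm' : (R.filter (fun tb => q.2.any (fun k => PySem.Str.isIn k tb.1))).isEmpty = false :=
        Bool.eq_false_iff.mpr hm
      simp only [hm', Bool.false_eq_true, if_false]
      rw [ih hnd' _ _]
      have hfilt : ∀ (c : Option String → Bool),
          (R.filter (fun tb => !q.2.any (fun k => PySem.Str.isIn k tb.1))).filter
              (fun tb => c (pvFM l tb.1))
          = R.filter (fun tb => c (pvFM l tb.1) && !pvMatch q.2 tb.1) := by
        intro c
        rw [List.filter_filter]
        rfl
      simp only [Prod.mk.injEq]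
      constructor
      · simp only [List.map_cons, List.filter_cons]
        have hgrp : (R.filter (fun tb => pvFM (q :: l) tb.1 == some q.1))
            = R.filter (fun tb => q.2.any (fun k => PySem.Str.isIn k tb.1)) := hmatch.symm
        have hne : (!((R.filter (fun tb => pvFM (q :: l) tb.1 == some q.1)).map (·.2)).isEmpty) = true := by
          rw [hgrp]
          simpa using hm
        simp only [hne, if_true]
        rw [List.append_assoc, List.singleton_append, hgrp]
        congr 1
        congr 1
        congr 1
        apply List.map_congr_left
        intro p hp
        have hfc : R.filter (fun tb => pvFM l tb.1 == some p.1 && !pvMatch q.2 tb.1)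
            = R.filter (fun tb => pvFM (q :: l) tb.1 == some p.1) := by
          apply List.filter_congr
          intro tb _
          rw [hb p hp tb.1, Bool.and_comm]
        rw [hfilt (fun o => o == some p.1), hfc]
      · rw [hfilt (fun o => o == none)]
        apply List.filter_congr
        intro tb _
        rw [hc tb.1, Bool.and_comm]

-- group peeled off at a theme key = that theme's bills in input order
theorem pv_grp_theme (bills : List (List (String × String))) (k : String)
    (hk : k ∈ pvThemeKW.map Prod.fst) :
    (((bills.map (fun b => (pvBillText b, b))).filter
        (fun tb => pvFM pvThemeKW tb.1 == some k)).map (·.2)) = pvG bills k := by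
  have hko : k ≠ "other" := by
    intro e; subst e; revert hk; decide
  unfold pvG
  induction bills with
  | nil => rfl
  | cons b bs ih =>
    have hcond : (pvFM pvThemeKW (pvBillText b) == some k) = (pvClassify b == k) := by
      rw [pvClassify_getD]
      cases h : pvFM pvThemeKW (pvBillText b) with
      | none => simp [hko.symm]
      | some j => simp
    simp only [List.map_cons, List.filter_cons, hcond]
    generalize pvClassify b = c
    by_cases h : c == k
    · rw [if_pos h, if_pos h, List.map_cons, List.map_cons, ih]
    · rw [if_neg h, if_neg h, ih]

-- leftovers of the pool = the "other" group
theorem pv_grp_other (bills : List (List (String × String))) :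
    (((bills.map (fun b => (pvBillText b, b))).filter
        (fun tb => pvFM pvThemeKW tb.1 == none)).map (·.2)) = pvG bills "other" := by
  unfold pvG
  induction bills with
  | nil => rfl
  | cons b bs ih =>
    have hcond : (pvFM pvThemeKW (pvBillText b) == none) = (pvClassify b == "other") := by
      rw [pvClassify_getD]
      cases h : pvFM pvThemeKW (pvBillText b) with
      | none => simp
      | some j =>
        have : j ≠ "other" := by
          intro e
          have := pvFM_mem h
          rw [e] at this
          revert this; decide
        simp [this]
    simp only [List.map_cons, List.filter_cons, hcond]
    generalize pvClassify b = c
    by_cases h : c == "other"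
    · rw [if_pos h, if_pos h, List.map_cons, List.map_cons, ih]
    · rw [if_neg h, if_neg h, ih]

theorem pv_B_eq (bills : List (List (String × String))) :
    group_bills_by_theme_alt bills
    = (pvKeys.map (fun k => (k, pvG bills k))).filter (fun kv => !kv.2.isEmpty) := by
  simp only [group_bills_by_theme_alt]
  rw [pvB_fold pvThemeKW (by decide) [] (bills.map (fun b => (pvBillText b, b)))]
  simp only [List.nil_append]
  have hthemes : (pvThemeKW.map (fun p => (p.1,
      (((bills.map (fun b => (pvBillText b, b))).filter
        (fun tb => pvFM pvThemeKW tb.1 == some p.1)).map (·.2)))))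
      = pvThemeKW.map (fun p => (p.1, pvG bills p.1)) := by
    apply List.map_congr_left
    intro p hp
    congr 1
    exact pv_grp_theme bills p.1 (List.mem_map.mpr ⟨p, hp, rfl⟩)
  rw [hthemes]
  have hother := pv_grp_other bills
  have hkeys : pvKeys.map (fun k => (k, pvG bills k))
      = pvThemeKW.map (fun p => (p.1, pvG bills p.1)) ++ [("other", pvG bills "other")] := by
    unfold pvKeys
    rw [List.map_append, List.map_map]
    rfl
  rw [hkeys, List.filter_append]
  have hiso : ((bills.map (fun b => (pvBillText b, b))).filter
      (fun tb => pvFM pvThemeKW tb.1 == none)).isEmpty = (pvG bills "other").isEmpty := by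
    rw [← hother, List.isEmpty_map]
  by_cases h : (pvG bills "other").isEmpty
  · have h' : ((bills.map (fun b => (pvBillText b, b))).filter
        (fun tb => pvFM pvThemeKW tb.1 == none)).isEmpty = true := by rw [hiso]; simpa using h
    simp only [h', if_true]
    simp [List.filter_cons, h]
  · have h' : ((bills.map (fun b => (pvBillText b, b))).filter
        (fun tb => pvFM pvThemeKW tb.1 == none)).isEmpty = false := by
      rw [hiso]; simpa using h
    simp only [h', Bool.false_eq_true, if_false]
    rw [hother]
    simp [List.filter_cons, h]

-- ===== VERDICT (by name: the statement is the Claim_ definition above) =====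
theorem group_bills_by_theme_spec : Claim_equal_group_bills_by_theme := by
  intro bills _
  unfold Spec_group_bills_by_theme
  rw [pv_A_eq, pv_B_eq]
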